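-- pv_equiv track=rewrite | github.com/RandyRDavila/Ramsey-MuZero | app.py | build_circulant_classes
-- ===== SOURCE A (Python) =====
-- from typing import Dict, List, Optional, Tuple
--
-- Edge = Tuple[int, int]
--
-- def build_circulant_classes(n: int, edges: List[Edge]) -> List[List[int]]:
--     """For current n, return class_edges[d-1] = list of edge indices in distance class d.
--     Distance d(i,j) = min(|i-j|, n - |i-j|), d in 1..floor(n/2).
--     """
--     max_d = n // 2
--     classes: List[List[int]] = [[] for _ in range(max_d)]
--     for idx, (i, j) in enumerate(edges):
--         delta = j - i  # since i < j
--         d = min(delta, n - delta)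
--         if 1 <= d <= max_d:
--             classes[d - 1].append(idx)
--     return classes
-- ===== SOURCE B (Python) =====
-- def build_circulant_classes(n, edges):
--     """Class-first gather: for each distance class d, collect matching edge indices."""
--     max_d = n // 2
--     return [
--         [idx for idx, (i, j) in enumerate(edges) if min(j - i, n - (j - i)) == d]
--         for d in range(1, max_d + 1)
--     ]
-- ===== Notes on version B (the rewrite author's own statement) =====
-- stated objective: simpler
-- what changed: B builds the result class-first with a nested comprehension (for each distance d, gather the edge indices whose distance equals d), replacing A's edge-first scatter into a preallocated mutable bucket list.
import Mathlib
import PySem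

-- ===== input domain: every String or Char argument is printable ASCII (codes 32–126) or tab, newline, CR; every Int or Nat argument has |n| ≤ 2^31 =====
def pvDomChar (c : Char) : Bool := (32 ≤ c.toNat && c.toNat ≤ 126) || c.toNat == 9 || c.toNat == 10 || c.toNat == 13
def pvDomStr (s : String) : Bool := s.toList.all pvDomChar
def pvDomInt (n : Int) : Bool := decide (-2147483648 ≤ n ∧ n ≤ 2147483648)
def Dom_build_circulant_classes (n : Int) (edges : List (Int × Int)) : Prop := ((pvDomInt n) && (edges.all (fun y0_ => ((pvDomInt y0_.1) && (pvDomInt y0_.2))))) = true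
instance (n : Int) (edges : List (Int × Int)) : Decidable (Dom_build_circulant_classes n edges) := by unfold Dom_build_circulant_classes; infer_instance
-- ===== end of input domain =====

-- B replaces A's edge-first scatter into mutable buckets by a class-first gather
-- (one filtering pass per distance class); objective: simpler.

-- ===== PORT A =====
-- edge-first: preallocate max_d empty buckets, scatter each edge index into classes[d-1]
-- (the in-range guard 1 <= d <= max_d makes the getD default [] unreachable, so it is exact)
def build_circulant_classes (n : Int) (edges : List (Int × Int)) : List (List Int) :=
  let max_d := PySem.Int.floordiv n 2
  let classes : List (List Int) := (PySem.List.pyRange 0 max_d 1).map (fun _ => ([] : List Int))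
  (PySem.List.enumerate edges 0).foldl
    (fun classes p =>
      let idx := p.1
      let i := p.2.1
      let j := p.2.2
      let delta := j - i
      let d := min delta (n - delta)
      if 1 ≤ d ∧ d ≤ max_d then
        classes.set (d - 1).toNat ((classes.getD (d - 1).toNat []) ++ [idx])
      else classes)
    classes

-- ===== PORT B =====
-- class-first: for each d in 1..max_d, gather the indices of edges at distance d
def build_circulant_classes_alt (n : Int) (edges : List (Int × Int)) : List (List Int) :=
  let max_d := PySem.Int.floordiv n 2
  (PySem.List.pyRange 1 (max_d + 1) 1).map (fun d =>
    (PySem.List.enumerate edges 0).filterMap (fun p =>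
      if min (p.2.2 - p.2.1) (n - (p.2.2 - p.2.1)) = d then some p.1 else none))

-- ===== PRECONDITION & SPEC =====
def Spec_build_circulant_classes (n : Int) (edges : List (Int × Int)) (out : List (List Int)) : Prop := out = build_circulant_classes_alt n edges
instance (n : Int) (edges : List (Int × Int)) (out : List (List Int)) : Decidable (Spec_build_circulant_classes n edges out) := by unfold Spec_build_circulant_classes; infer_instance

-- ===== CLAIM (what is proved, stated in full; the proofs are below) =====
def Claim_equal_build_circulant_classes : Prop := ∀ (n : Int) (edges : List (Int × Int)), Dom_build_circulant_classes n edges → Spec_build_circulant_classes n edges (build_circulant_classes n edges)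

-- ===== LEMMAS AND PROOFS =====

-- the indices gathered for bucket k (0-based) from the enumerated-edge list es
def pvGather (n : Int) (k : Nat) (es : List (Int × (Int × Int))) : List Int :=
  es.filterMap (fun p =>
    if min (p.2.2 - p.2.1) (n - (p.2.2 - p.2.1)) = (k : Int) + 1 then some p.1 else none)

-- A's loop, with arbitrary accumulator of length M.toNat, appends pvGather bucket-wise
lemma pvFoldA (n M : Int) : ∀ (es : List (Int × (Int × Int))) (cs : List (List Int)),
    cs.length = M.toNat →
    es.foldl
      (fun classes p =>
        let idx := p.1
        let i := p.2.1
        let j := p.2.2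
        let delta := j - i
        let d := min delta (n - delta)
        if 1 ≤ d ∧ d ≤ M then
          classes.set (d - 1).toNat ((classes.getD (d - 1).toNat []) ++ [idx])
        else classes)
      cs
    = cs.mapIdx (fun k c => c ++ pvGather n k es) := by
  intro es
  induction es with
  | nil =>
    intro cs _
    apply List.ext_getElem (by simp)
    intro k hk1 hk2
    simp [pvGather]
  | cons p es ih =>
    intro cs hlen
    simp only [List.foldl_cons]
    set d := min (p.2.2 - p.2.1) (n - (p.2.2 - p.2.1)) with hd
    by_cases hc : 1 ≤ d ∧ d ≤ M
    · have hpos : (d - 1).toNat < cs.length := by omega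
      rw [if_pos hc, ih _ (by simpa using hlen)]
      apply List.ext_getElem (by simp)
      intro k hk1 hk2
      simp only [List.getElem_mapIdx]
      by_cases hkd : k = (d - 1).toNat
      · subst hkd
        have hcond : min (p.2.2 - p.2.1) (n - (p.2.2 - p.2.1)) = ((d - 1).toNat : Int) + 1 := by
          rw [← hd]; omega
        have hpos' : d.toNat - 1 < cs.length := by omega
        simp [pvGather, hcond, List.getD_eq_getElem?_getD,
          List.getElem?_eq_getElem hpos']
      · have hne : ¬ (min (p.2.2 - p.2.1) (n - (p.2.2 - p.2.1)) = (k : Int) + 1) := by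
          rw [← hd]; omega
        simp [pvGather, hne,
          List.getElem_set_ne (by omega : d.toNat - 1 ≠ k)]
    · rw [if_neg hc, ih _ hlen]
      apply List.ext_getElem (by simp)
      intro k hk1 hk2
      have hklt : k < M.toNat := by simpa [hlen] using hk1
      have hne : ¬ (d = (k : Int) + 1) := by omega
      simp [pvGather, ← hd, hne]

theorem build_circulant_classes_spec : Claim_equal_build_circulant_classes := by
  intro n edges _
  unfold Spec_build_circulant_classes build_circulant_classes build_circulant_classes_alt
  set M := PySem.Int.floordiv n 2 with hM
  rw [pvFoldA n M (PySem.List.enumerate edges 0)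
      ((PySem.List.pyRange 0 M 1).map (fun _ => ([] : List Int)))
      (by simp [PySem.List.length_pyRange_one])]
  apply List.ext_getElem
  · simp [PySem.List.length_pyRange_one]
  · intro k hk1 hk2
    simp only [List.getElem_mapIdx, List.getElem_map, PySem.List.getElem_pyRange_one]
    have h1 : (1 : Int) + (k : Int) = (k : Int) + 1 := by ring
    simp [pvGather, h1]
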